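-- pv_equiv track=rewrite | github.com/mariabaladuggimpudi/data-struct-n-algos | epi_judge_python/k_largest_in_heap.py | k_largest_in_binary_heap
-- ===== SOURCE A (Python) =====
-- import heapq
-- from typing import List
--
-- def k_largest_in_binary_heap(A: List[int], k: int) -> List[int]:
--     # TODO - you fill in here.
--     if not len(A):
--         return []
--     result = []
--     min_heap = [(-(A[0]), 0)]
--     heapq.heapify(min_heap)
--     index = 0
--     while min_heap and len(result) < k:
--         num, index = heapq.heappop(min_heap)
--         result.append(-num)
--
--         if ((2*index) + 1) < len(A):
--             heapq.heappush(min_heap, (-A[(2*index) + 1], 2*index +1))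
--         if ((2 * index) + 2) < len(A):
--             heapq.heappush(min_heap, (-A[(2 * index) + 2], 2 * index + 2))
--     return result
-- ===== SOURCE B (Python) =====
-- from typing import List
--
--
-- def _before(p, q):
--     # p must come before q: larger value first, ties by smaller index
--     return q[0] < p[0] or (p[0] == q[0] and p[1] <= q[1])
--
--
-- def _insert(cand, p):
--     # insert p into the sorted candidate list, keeping it sorted;
--     # scan from the right, where fresh (smaller) candidates usually belong
--     hi = len(cand)
--     while hi > 0 and not _before(cand[hi - 1], p):
--         hi -= 1
--     cand.insert(hi, p)
--
--
-- def k_largest_in_binary_heap(A: List[int], k: int) -> List[int]: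
--     if not A:
--         return []
--     result = []
--     cand = [(A[0], 0)]  # kept sorted: largest value first, ties by smallest index
--     while cand and len(result) < k:
--         v, i = cand.pop(0)
--         result.append(v)
--         for j in (2 * i + 1, 2 * i + 2):
--             if j < len(A):
--                 _insert(cand, (A[j], j))
--     return result
-- ===== Notes on version B (the rewrite author's own statement) =====
-- stated objective: alternative
-- what changed: Replaces heapq's negated-value binary heap by a candidate list kept sorted (largest value first, ties by smallest index) via a hand-written right-scanning insertion; each step pops the head instead of heappop and insorts the children instead of heappush.
import Mathlib
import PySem

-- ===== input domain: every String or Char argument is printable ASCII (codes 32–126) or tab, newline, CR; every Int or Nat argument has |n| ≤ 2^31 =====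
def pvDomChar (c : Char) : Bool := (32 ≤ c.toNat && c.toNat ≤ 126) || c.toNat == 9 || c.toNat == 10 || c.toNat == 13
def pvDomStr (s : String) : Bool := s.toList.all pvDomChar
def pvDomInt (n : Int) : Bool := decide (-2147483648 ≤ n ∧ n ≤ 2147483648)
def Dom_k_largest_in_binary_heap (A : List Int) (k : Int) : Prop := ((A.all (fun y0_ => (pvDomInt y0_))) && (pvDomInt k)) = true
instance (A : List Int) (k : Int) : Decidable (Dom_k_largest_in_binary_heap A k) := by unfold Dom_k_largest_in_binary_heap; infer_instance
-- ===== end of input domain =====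

-- B replaces heapq's negated-value binary heap by a candidate list kept sorted
-- (largest value first, ties smallest index) via hand-written insertion
-- (alternative data structure, same exact output).

-- ===== PORT A =====
-- heapq on a list of (Int × Int) pairs, modelled at the multiset level:
-- heappop returns the lexicographically least pair and the remaining pairs,
-- heappush appends (the internal heap array order is irrelevant to A's output).
def heapPop : List (Int × Int) → Option ((Int × Int) × List (Int × Int))
  | [] => none
  | p :: t =>
    match heapPop t with
    | none => some (p, [])
    | some (m, r) =>
      if m.1 < p.1 ∨ (m.1 = p.1 ∧ m.2 < p.2) then some (m, p :: r) else some (p, t)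

-- the while loop of A; fuel = number of iterations still allowed by len(result) < k
def loopA (A : List Int) : Nat → List (Int × Int) → List Int
  | 0, _ => []
  | fuel + 1, heap =>
    match heapPop heap with
    | none => []
    | some (m, r) =>
      let i := m.2
      let r1 := if 2 * i + 1 < (A.length : Int)
        then r ++ [(-((PySem.List.pyGet? A (2 * i + 1)).getD 0), 2 * i + 1)] else r
      let r2 := if 2 * i + 2 < (A.length : Int)
        then r1 ++ [(-((PySem.List.pyGet? A (2 * i + 2)).getD 0), 2 * i + 2)] else r1
      (-m.1) :: loopA A fuel r2

def k_largest_in_binary_heap (A : List Int) (k : Int) : List Int :=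
  if A.length = 0 then []
  else loopA A k.toNat [(-((PySem.List.pyGet? A 0).getD 0), 0)]

-- ===== PORT B =====
-- p must come before q in the sorted candidate list (_before in Source B)
def keyBefore (p q : Int × Int) : Bool :=
  q.1 < p.1 || (p.1 == q.1 && p.2 ≤ q.2)

-- _insert in Source B: p goes right after the elements that come before it
-- (Source B finds that boundary scanning from the right; on the sorted candidate
-- list both scans stop at the same boundary)
def insSorted (p : Int × Int) : List (Int × Int) → List (Int × Int)
  | [] => [p]
  | q :: t => if keyBefore q p then q :: insSorted p t else p :: q :: t

-- the while loop of B: pop the head of the sorted list, insort the children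
def loopB (A : List Int) : Nat → List (Int × Int) → List Int
  | 0, _ => []
  | _ + 1, [] => []
  | fuel + 1, c :: t =>
    let i := c.2
    let r1 := if 2 * i + 1 < (A.length : Int)
      then insSorted ((PySem.List.pyGet? A (2 * i + 1)).getD 0, 2 * i + 1) t else t
    let r2 := if 2 * i + 2 < (A.length : Int)
      then insSorted ((PySem.List.pyGet? A (2 * i + 2)).getD 0, 2 * i + 2) r1 else r1
    c.1 :: loopB A fuel r2

def k_largest_in_binary_heap_alt (A : List Int) (k : Int) : List Int :=
  if A = [] then []
  else loopB A k.toNat [((PySem.List.pyGet? A 0).getD 0, 0)]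

-- ===== PRECONDITION & SPEC =====
def Spec_k_largest_in_binary_heap (A : List Int) (k : Int) (out : List Int) : Prop := out = k_largest_in_binary_heap_alt A k
instance (A : List Int) (k : Int) (out : List Int) : Decidable (Spec_k_largest_in_binary_heap A k out) := by unfold Spec_k_largest_in_binary_heap; infer_instance

-- ===== CLAIM (what is proved, stated in full; the proofs are below) =====
def Claim_equal_k_largest_in_binary_heap : Prop := ∀ (A : List Int) (k : Int), Dom_k_largest_in_binary_heap A k → Spec_k_largest_in_binary_heap A k (k_largest_in_binary_heap A k)

-- ===== LEMMAS AND PROOFS =====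

-- A stores (-value, index); B stores (value, index)
def pvNeg1 (p : Int × Int) : Int × Int := (-p.1, p.2)

-- "a may precede b" in B's order (larger value first, ties smaller index)
def ROrd (a b : Int × Int) : Prop := ¬ (a.1 < b.1 ∨ (b.1 = a.1 ∧ b.2 < a.2))

theorem heapPop_eq_none (l : List (Int × Int)) : heapPop l = none ↔ l = [] := by
  cases l with
  | nil => simp [heapPop]
  | cons p t =>
    simp only [heapPop]
    cases h : heapPop t with
    | none => simp
    | some mr => by_cases hc : (mr.1.1 < p.1 ∨ (mr.1.1 = p.1 ∧ mr.1.2 < p.2)) <;> simp [hc]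

theorem heapPop_perm (l : List (Int × Int)) (m : Int × Int) (r : List (Int × Int))
    (h : heapPop l = some (m, r)) : l.Perm (m :: r) := by
  induction l generalizing m r with
  | nil => simp [heapPop] at h
  | cons p t ih =>
    simp only [heapPop] at h
    cases hp : heapPop t with
    | none =>
      rw [hp] at h
      rw [(heapPop_eq_none t).mp hp]
      simp_all
    | some mr =>
      rw [hp] at h
      by_cases hc : (mr.1.1 < p.1 ∨ (mr.1.1 = p.1 ∧ mr.1.2 < p.2))
      · simp only [if_pos hc, Option.some.injEq, Prod.mk.injEq] at h
        obtain ⟨h1, h2⟩ := h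
        subst h1; subst h2
        have := ih mr.1 mr.2 (by rw [hp])
        exact (this.cons p).trans (List.Perm.swap _ _ _)
      · simp only [if_neg hc, Option.some.injEq, Prod.mk.injEq] at h
        obtain ⟨h1, h2⟩ := h
        subst h1; subst h2
        exact List.Perm.refl _

theorem heapPop_min (l : List (Int × Int)) (m : Int × Int) (r : List (Int × Int))
    (h : heapPop l = some (m, r)) :
    ∀ x ∈ l, ¬ (x.1 < m.1 ∨ (x.1 = m.1 ∧ x.2 < m.2)) := by
  induction l generalizing m r with
  | nil => simp [heapPop] at h
  | cons p t ih =>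
    simp only [heapPop] at h
    cases hp : heapPop t with
    | none =>
      rw [hp] at h
      have ht : t = [] := (heapPop_eq_none t).mp hp
      subst ht
      simp only [Option.some.injEq, Prod.mk.injEq] at h
      obtain ⟨h1, _⟩ := h; subst h1
      intro x hx; simp at hx; subst hx; omega
    | some mr =>
      rw [hp] at h
      have htail := ih mr.1 mr.2 (by rw [hp])
      by_cases hc : (mr.1.1 < p.1 ∨ (mr.1.1 = p.1 ∧ mr.1.2 < p.2))
      · simp only [if_pos hc, Option.some.injEq, Prod.mk.injEq] at h
        obtain ⟨h1, _⟩ := h; subst h1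
        intro x hx
        rcases List.mem_cons.mp hx with hx | hx
        · subst hx; omega
        · exact htail x hx
      · simp only [if_neg hc, Option.some.injEq, Prod.mk.injEq] at h
        obtain ⟨h1, _⟩ := h; subst h1
        intro x hx
        rcases List.mem_cons.mp hx with hx | hx
        · subst hx; omega
        · have := htail x hx; omega

theorem insSorted_perm (p : Int × Int) (l : List (Int × Int)) :
    (insSorted p l).Perm (p :: l) := by
  induction l with
  | nil => simp [insSorted]
  | cons q t ih =>
    simp only [insSorted]
    by_cases hc : keyBefore q p = true
    · simp only [hc, if_true]
      exact (ih.cons q).trans (List.Perm.swap _ _ _)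
    · simp [hc]

theorem keyBefore_true (p q : Int × Int) (h : keyBefore p q = true) : ROrd p q := by
  simp only [keyBefore, Bool.or_eq_true, Bool.and_eq_true, decide_eq_true_eq, beq_iff_eq] at h
  unfold ROrd; omega

theorem keyBefore_false (p q : Int × Int) (h : keyBefore p q = false) : ROrd q p := by
  simp only [keyBefore, Bool.or_eq_false_iff, Bool.and_eq_false_iff, decide_eq_false_iff_not, beq_eq_false_iff_ne] at h
  unfold ROrd; rcases h with ⟨h1, h2 | h2⟩ <;> omega

theorem insSorted_pairwise (p : Int × Int) (l : List (Int × Int))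
    (h : l.Pairwise ROrd) : (insSorted p l).Pairwise ROrd := by
  induction l with
  | nil => simp [insSorted, List.pairwise_cons]
  | cons q t ih =>
    rcases List.pairwise_cons.mp h with ⟨hq, ht⟩
    simp only [insSorted]
    by_cases hc : keyBefore q p = true
    · simp only [hc, if_true]
      refine List.pairwise_cons.mpr ⟨?_, ih ht⟩
      intro x hx
      have hx' := (insSorted_perm p t).mem_iff.mp hx
      rcases List.mem_cons.mp hx' with hx' | hx'
      · subst hx'; exact keyBefore_true _ _ hc
      · exact hq x hx'
    · simp only [hc]
      refine List.pairwise_cons.mpr ⟨?_, h⟩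
      intro x hx
      rcases List.mem_cons.mp hx with hx | hx
      · subst hx; exact keyBefore_false _ _ (by simpa using hc)
      · have h1 := keyBefore_false q p (by simpa using hc)
        have h2 := hq x hx
        unfold ROrd at *; omega

theorem loop_eq (Arr : List Int) (fuel : Nat) :
    ∀ heap cand, heap.Perm (cand.map pvNeg1) → cand.Pairwise ROrd →
      loopA Arr fuel heap = loopB Arr fuel cand := by
  induction fuel with
  | zero => intro heap cand _ _; rfl
  | succ f ih =>
    intro heap cand hperm hsort
    cases cand with
    | nil =>
      have : heap = [] := by simpa using hperm.eq_nil
      subst this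
      simp [loopA, loopB, heapPop]
    | cons c t =>
      have hne : heap ≠ [] := by
        intro h; subst h
        have := hperm.symm.eq_nil
        simp at this
      obtain ⟨⟨m, r⟩, hpop⟩ : ∃ mr, heapPop heap = some mr := by
        cases hh : heapPop heap with
        | none => exact absurd ((heapPop_eq_none heap).mp hh) hne
        | some mr => exact ⟨mr, rfl⟩
      have hpermA : heap.Perm (m :: r) := heapPop_perm heap m r hpop
      -- the head of the sorted list is everyone's ROrd-lower bound
      have hhead : ∀ x ∈ c :: t, ROrd c x := by
        intro x hx
        rcases List.mem_cons.mp hx with hx | hx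
        · subst hx; unfold ROrd; omega
        · exact (List.pairwise_cons.mp hsort).1 x hx
      have hmB : pvNeg1 c ∈ heap := by
        exact hperm.mem_iff.mpr (List.mem_map_of_mem (by simp))
      have hmA : m ∈ heap := hpermA.mem_iff.mpr (by simp)
      have h1 : ¬ (((pvNeg1 c).1 : Int) < m.1 ∨ ((pvNeg1 c).1 = m.1 ∧ (pvNeg1 c).2 < m.2)) :=
        heapPop_min heap m r hpop _ hmB
      have h2 : ROrd c (-m.1, m.2) := by
        obtain ⟨x, hxmem, hxeq⟩ := List.mem_map.mp (hperm.mem_iff.mp hmA)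
        have hx := hhead x hxmem
        have hm1 : m.1 = -x.1 := by rw [← hxeq]; simp [pvNeg1]
        have hm2 : m.2 = x.2 := by rw [← hxeq]; simp [pvNeg1]
        unfold ROrd at hx ⊢; rw [hm1, hm2]; simpa using hx
      have hmeq : m = pvNeg1 c := by
        unfold ROrd at h2
        simp only [pvNeg1] at h1 h2 ⊢
        have e1 : m.1 = -c.1 := by omega
        have e2 : m.2 = c.2 := by omega
        exact Prod.ext e1 e2
      have hrest : r.Perm (t.map pvNeg1) := by
        have hA : (m :: r).Perm (pvNeg1 c :: t.map pvNeg1) :=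
          hpermA.symm.trans hperm
        rw [hmeq] at hA
        exact hA.cons_inv
      have hi : m.2 = c.2 := by rw [hmeq]; rfl
      have hv : -m.1 = c.1 := by rw [hmeq]; simp [pvNeg1]
      simp only [loopA, loopB, hpop]
      rw [hv, hi]
      congr 1
      -- the next frontier: map/Perm and sortedness survive every child case
      have hmap : ∀ (p : Int × Int) (l : List (Int × Int)),
          ((insSorted p l).map pvNeg1).Perm (pvNeg1 p :: l.map pvNeg1) :=
        fun p l => (insSorted_perm p l).map pvNeg1
      have htsort : t.Pairwise ROrd := (List.pairwise_cons.mp hsort).2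
      by_cases hL : 2 * c.2 + 1 < (Arr.length : Int) <;>
        by_cases hR : 2 * c.2 + 2 < (Arr.length : Int) <;>
          simp only [hL, hR, if_true, if_false]
      · -- both children
        refine ih _ _ ?_ (insSorted_pairwise _ _ (insSorted_pairwise _ _ htsort))
        refine ((List.perm_append_singleton _ _).trans
          (List.Perm.cons _ ((List.perm_append_singleton _ _).trans (List.Perm.cons _ hrest)))).trans ?_
        exact ((hmap ((PySem.List.pyGet? Arr (2 * c.2 + 2)).getD 0, 2 * c.2 + 2)
            (insSorted ((PySem.List.pyGet? Arr (2 * c.2 + 1)).getD 0, 2 * c.2 + 1) t)).trans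
          (List.Perm.cons _ (hmap ((PySem.List.pyGet? Arr (2 * c.2 + 1)).getD 0, 2 * c.2 + 1) t))).symm
      · -- left child only
        refine ih _ _ ?_ (insSorted_pairwise _ _ htsort)
        refine ((List.perm_append_singleton _ _).trans (List.Perm.cons _ hrest)).trans ?_
        exact (hmap ((PySem.List.pyGet? Arr (2 * c.2 + 1)).getD 0, 2 * c.2 + 1) t).symm
      · -- right child only
        refine ih _ _ ?_ (insSorted_pairwise _ _ htsort)
        refine ((List.perm_append_singleton _ _).trans (List.Perm.cons _ hrest)).trans ?_
        exact (hmap ((PySem.List.pyGet? Arr (2 * c.2 + 2)).getD 0, 2 * c.2 + 2) t).symm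
      · -- no children
        exact ih _ _ hrest htsort

-- ===== VERDICT (by name: the statement is the Claim_ definition above) =====
theorem k_largest_in_binary_heap_spec : Claim_equal_k_largest_in_binary_heap := by
  intro A k _
  unfold Spec_k_largest_in_binary_heap k_largest_in_binary_heap k_largest_in_binary_heap_alt
  cases A with
  | nil => simp
  | cons a as =>
    rw [if_neg (show ¬ ((a :: as).length = 0) by simp), if_neg (show ¬ (a :: as = []) by simp)]
    exact loop_eq (a :: as) k.toNat _ _ (by simp [pvNeg1]) (by simp)
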